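-- pv_equiv track=rewrite | github.com/ignacioFinochietti/2048 | 2048.py | pasar_ceros_derecha
-- ===== SOURCE A (Python) =====
-- def pasar_ceros_derecha(matriz):
--     # Intercambia posicion entre los 0 y los numeros distintos a 0, dejando a la derecha los numeros distintos a 0 y a la izquierda los 0 si es que los hay
--     for f in range(4):
--       for c in range(2,-1,-1):
--         aux=c
--         while (aux<=2 and matriz[f][aux+1]==0):
--           box=matriz[f][aux+1]
--           matriz[f][aux+1] = matriz[f][aux]
--           matriz[f][aux] = box
--           aux = aux + 1
--     return matriz
-- ===== SOURCE B (Python) =====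
-- def pasar_ceros_derecha(matriz):
--     # Gather each row's nonzeros (first 4 cells), then rewrite the row in place:
--     # zeros on the left, the nonzeros (stable order) on the right.
--     for f in range(4):
--         fila = matriz[f]
--         nz = [x for x in fila[:4] if x != 0]
--         k = len(nz)
--         for c in range(4):
--             fila[c] = 0 if c < 4 - k else nz[c - (4 - k)]
--     return matriz
-- ===== Notes on version B (the rewrite author's own statement) =====
-- stated objective: simpler
-- what changed: Replaces the per-cell bubble/swap while-loop with a single gather of each row's nonzeros followed by one placement pass (zeros left, nonzeros right).
import Mathlib
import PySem

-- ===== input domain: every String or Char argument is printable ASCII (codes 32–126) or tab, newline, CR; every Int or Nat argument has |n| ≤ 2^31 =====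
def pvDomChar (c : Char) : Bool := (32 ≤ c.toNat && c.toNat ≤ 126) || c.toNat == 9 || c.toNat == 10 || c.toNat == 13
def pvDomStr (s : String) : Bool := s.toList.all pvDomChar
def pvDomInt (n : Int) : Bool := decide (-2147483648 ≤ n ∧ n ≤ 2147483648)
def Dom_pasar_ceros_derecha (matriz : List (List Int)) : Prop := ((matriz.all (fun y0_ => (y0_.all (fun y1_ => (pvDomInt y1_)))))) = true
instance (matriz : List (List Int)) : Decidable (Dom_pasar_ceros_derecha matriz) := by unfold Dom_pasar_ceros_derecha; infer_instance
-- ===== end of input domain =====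

-- B replaces A's per-cell bubble/swap while-loop by one gather of each row's nonzeros
-- plus one placement pass (objective: simpler). Both Pythons mutate matriz in place;
-- the equivalence proved here is about the return value.

-- ===== PORT A =====
-- the inner while-loop of A: indices aux, aux+1 are nonnegative (aux starts in {2,1,0}
-- and only grows), so Nat indexing with getD default 0 is exact under Pre_ (index < length)
def pvBub (row : List Int) (aux : Nat) : List Int :=
  if h : aux ≤ 2 ∧ row.getD (aux + 1) 0 = 0 then
    -- box = row[aux+1]; row[aux+1] = row[aux]; row[aux] = box; aux += 1
    pvBub ((row.set (aux + 1) (row.getD aux 0)).set aux (row.getD (aux + 1) 0)) (aux + 1)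
  else row
termination_by 3 - aux
decreasing_by omega

-- for c in range(2,-1,-1): aux = c; <while-loop>   (range(2,-1,-1) = [2,1,0])
def pvRowA (row : List Int) : List Int := [2, 1, 0].foldl (fun r c => pvBub r c) row

-- for f in range(4): mutate matriz[f] in place (modelled as set; getD exact under Pre_)
def pasar_ceros_derecha (matriz : List (List Int)) : List (List Int) :=
  (List.range 4).foldl (fun m f => m.set f (pvRowA (m.getD f []))) matriz

-- ===== PORT B =====
-- nz = [x for x in fila[:4] if x != 0]; then fila[c] = 0 for c < 4-k, nz[c-(4-k)] after:
-- i.e. the first 4 cells become replicate (4-k) 0 ++ nz (exact for rows of length ≥ 4, Pre_)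
def pvFixRow (row : List Int) : List Int :=
  let nz := (row.take 4).filter (fun x => x ≠ 0)
  List.replicate (4 - nz.length) 0 ++ nz ++ row.drop 4

def pasar_ceros_derecha_alt (matriz : List (List Int)) : List (List Int) :=
  (List.range 4).foldl (fun m f => m.set f (pvFixRow (m.getD f []))) matriz

-- ===== PRECONDITION & SPEC =====
-- A indexes matriz[f][c] for f,c in 0..3 and raises IndexError otherwise:
-- Pre_ requires at least 4 rows, the first 4 of length at least 4.
def Pre_pasar_ceros_derecha (matriz : List (List Int)) : Prop :=
  4 ≤ matriz.length ∧ ∀ r ∈ matriz.take 4, 4 ≤ r.length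
instance (matriz : List (List Int)) : Decidable (Pre_pasar_ceros_derecha matriz) := by
  unfold Pre_pasar_ceros_derecha; infer_instance

def pvWitness_pasar_ceros_derecha : List (List Int) :=
  [[1, 0, 2, 0], [0, 0, 0, 0], [3, 4, 0, 5], [1, 1, 1, 1]]

def Spec_pasar_ceros_derecha (matriz : List (List Int)) (out : List (List Int)) : Prop := out = pasar_ceros_derecha_alt matriz
instance (matriz : List (List Int)) (out : List (List Int)) : Decidable (Spec_pasar_ceros_derecha matriz out) := by unfold Spec_pasar_ceros_derecha; infer_instance

-- ===== CLAIM (what is proved, stated in full; the proofs are below) =====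
def Claim_equal_pasar_ceros_derecha : Prop := ∀ (matriz : List (List Int)), Dom_pasar_ceros_derecha matriz → Pre_pasar_ceros_derecha matriz → Spec_pasar_ceros_derecha matriz (pasar_ceros_derecha matriz)

-- ===== LEMMAS AND PROOFS =====

-- per-row agreement: A's bubbling equals B's gather-and-place on any row of length ≥ 4
theorem row_eq (a b c d : Int) (t : List Int) :
    pvRowA (a :: b :: c :: d :: t) = pvFixRow (a :: b :: c :: d :: t) := by
  by_cases ha : a = 0 <;> by_cases hb : b = 0 <;> by_cases hc : c = 0 <;> by_cases hd : d = 0 <;>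
    simp [pvRowA, pvFixRow, pvBub, ha, hb, hc, hd]

-- ===== VERDICT (by name: the statement is the Claim_ definition above) =====
theorem pasar_ceros_derecha_spec : Claim_equal_pasar_ceros_derecha := by
  intro matriz _ hpre
  obtain ⟨hlen, hrows⟩ := hpre
  match matriz, hlen with
  | r0 :: r1 :: r2 :: r3 :: rest, _ =>
    have h0 := hrows r0 (by simp)
    have h1 := hrows r1 (by simp)
    have h2 := hrows r2 (by simp)
    have h3 := hrows r3 (by simp)
    obtain ⟨a0, b0, c0, d0, t0, rfl⟩ : ∃ a b c d t, r0 = a :: b :: c :: d :: t := by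
      match r0, h0 with | a :: b :: c :: d :: t, _ => exact ⟨a, b, c, d, t, rfl⟩
    obtain ⟨a1, b1, c1, d1, t1, rfl⟩ : ∃ a b c d t, r1 = a :: b :: c :: d :: t := by
      match r1, h1 with | a :: b :: c :: d :: t, _ => exact ⟨a, b, c, d, t, rfl⟩
    obtain ⟨a2, b2, c2, d2, t2, rfl⟩ : ∃ a b c d t, r2 = a :: b :: c :: d :: t := by
      match r2, h2 with | a :: b :: c :: d :: t, _ => exact ⟨a, b, c, d, t, rfl⟩
    obtain ⟨a3, b3, c3, d3, t3, rfl⟩ : ∃ a b c d t, r3 = a :: b :: c :: d :: t := by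
      match r3, h3 with | a :: b :: c :: d :: t, _ => exact ⟨a, b, c, d, t, rfl⟩
    show Spec_pasar_ceros_derecha _ _
    unfold Spec_pasar_ceros_derecha pasar_ceros_derecha pasar_ceros_derecha_alt
    simp [List.range_succ, row_eq]
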